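-- pv_equiv track=rewrite | github.com/adhi1911/AgenticRag | src/agent/react_agent.py | think
-- ===== SOURCE A (Python) =====
-- def think(query: str) -> str:
--     """
--     THINK step: Analyze the query to understand what's being asked.
--
--     Args:
--         query: User's question
--
--     Returns:
--         Analysis of the question
--     """
--     # Simple NLP-style analysis
--     question_type = "general"
--     if any(word in query.lower() for word in ['how', 'explain', 'describe']):
--         question_type = "explanatory"
--     elif any(word in query.lower() for word in ['what is', 'define', 'meaning']):
--         question_type = "definitional"
--     elif any(word in query.lower() for word in ['why', 'reason', 'cause']):
--         question_type = "causal"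
--     elif any(word in query.lower() for word in ['list', 'enumerate', 'give', 'examples']):
--         question_type = "listing"
--
--     analysis = (
--         f"Question type: {question_type}. "
--         f"Query length: {len(query.split())} words. "
--         f"Looking for: {question_type.lower()} information."
--     )
--     return analysis
-- ===== SOURCE B (Python) =====
-- # Flat keyword->priority scan: one pass over all keywords keeping the minimum
-- # matching priority, then index into the type table (instead of staged if/elif).
-- KEYWORD_PRIORITY = [
--     ("how", 0), ("explain", 0), ("describe", 0),
--     ("what is", 1), ("define", 1), ("meaning", 1),
--     ("why", 2), ("reason", 2), ("cause", 2),
--     ("list", 3), ("enumerate", 3), ("give", 3), ("examples", 3),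
-- ]
-- TYPES = ["explanatory", "definitional", "causal", "listing", "general"]
--
--
-- def think(query: str) -> str:
--     ql = query.lower()
--     best = 4
--     for kw, pri in KEYWORD_PRIORITY:
--         if pri < best and kw in ql:
--             best = pri
--     question_type = TYPES[best]
--     return (
--         f"Question type: {question_type}. "
--         f"Query length: {len(query.split())} words. "
--         f"Looking for: {question_type} information."
--     )
-- ===== Notes on version B (the rewrite author's own statement) =====
-- stated objective: alternative
-- what changed: Replaces the staged if/elif per-category checks with a single pass over a flat keyword->priority list that keeps the minimum matching priority as an accumulator, then indexes the type name from a table (and drops the redundant .lower() on the already-lowercase type name).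
import Mathlib
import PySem

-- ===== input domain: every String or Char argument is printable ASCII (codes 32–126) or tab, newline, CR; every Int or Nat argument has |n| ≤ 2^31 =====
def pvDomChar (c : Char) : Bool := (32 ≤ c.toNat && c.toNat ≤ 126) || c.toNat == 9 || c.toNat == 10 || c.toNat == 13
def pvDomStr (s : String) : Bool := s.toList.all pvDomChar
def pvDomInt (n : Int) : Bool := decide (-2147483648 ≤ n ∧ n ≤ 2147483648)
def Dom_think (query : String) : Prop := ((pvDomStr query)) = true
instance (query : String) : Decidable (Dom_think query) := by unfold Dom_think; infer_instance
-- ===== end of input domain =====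

-- B replaces A's staged if/elif category checks by a single min-priority scan over a
-- flat keyword->priority table, then a table lookup (objective: alternative; same output).

-- ===== PORT A =====
def think (query : String) : String :=
  let questionType0 : String := "general"
  let questionType : String :=
    if ["how", "explain", "describe"].any
        (fun w => PySem.Str.isIn w (PySem.Str.lower query)) then "explanatory"
    else if ["what is", "define", "meaning"].any
        (fun w => PySem.Str.isIn w (PySem.Str.lower query)) then "definitional"
    else if ["why", "reason", "cause"].any
        (fun w => PySem.Str.isIn w (PySem.Str.lower query)) then "causal"
    else if ["list", "enumerate", "give", "examples"].any
        (fun w => PySem.Str.isIn w (PySem.Str.lower query)) then "listing"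
    else questionType0
  "Question type: " ++ questionType ++ ". " ++
    "Query length: " ++ PySem.Int.toStr ((PySem.Str.split₀ query).length : Int) ++ " words. " ++
    "Looking for: " ++ PySem.Str.lower questionType ++ " information."

-- ===== PORT B =====
def keywordPriority : List (String × Nat) :=
  [("how", 0), ("explain", 0), ("describe", 0),
   ("what is", 1), ("define", 1), ("meaning", 1),
   ("why", 2), ("reason", 2), ("cause", 2),
   ("list", 3), ("enumerate", 3), ("give", 3), ("examples", 3)]

def typeNames : List String := ["explanatory", "definitional", "causal", "listing", "general"]

def think_alt (query : String) : String :=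
  let ql := PySem.Str.lower query
  let best : Nat :=
    keywordPriority.foldl
      (fun best kp => if kp.2 < best && PySem.Str.isIn kp.1 ql then kp.2 else best) 4
  let questionType : String := typeNames.getD best ""
  "Question type: " ++ questionType ++ ". " ++
    "Query length: " ++ PySem.Int.toStr ((PySem.Str.split₀ query).length : Int) ++ " words. " ++
    "Looking for: " ++ questionType ++ " information."

-- ===== PRECONDITION & SPEC =====
def Spec_think (query : String) (out : String) : Prop := out = think_alt query
instance (query : String) (out : String) : Decidable (Spec_think query out) := by unfold Spec_think; infer_instance

-- ===== CLAIM (what is proved, stated in full; the proofs are below) =====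
def Claim_equal_think : Prop := ∀ (query : String), Dom_think query → Spec_think query (think query)

-- ===== LEMMAS AND PROOFS =====

-- folding B's min-priority step over a same-priority group of keywords
theorem fold_group (f : String → Bool) (kws : List String) (p b : Nat) :
    (kws.map (fun k => (k, p))).foldl
        (fun best kp => if kp.2 < best && f kp.1 then kp.2 else best) b
      = if p < b && kws.any f then p else b := by
  induction kws generalizing b with
  | nil => simp
  | cons k rest ih =>
    simp only [List.map_cons, List.foldl_cons, List.any_cons]
    rw [ih]
    rcases Bool.eq_false_or_eq_true (f k) with hk | hk <;>
      rcases Bool.eq_false_or_eq_true (rest.any f) with ha | ha <;>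
      by_cases hp : p < b <;>
      simp [hk, ha, hp, Nat.lt_irrefl]

theorem keywordPriority_split :
    keywordPriority =
      (["how", "explain", "describe"].map (fun k => (k, 0)))
        ++ (["what is", "define", "meaning"].map (fun k => (k, 1)))
        ++ (["why", "reason", "cause"].map (fun k => (k, 2)))
        ++ (["list", "enumerate", "give", "examples"].map (fun k => (k, 3))) := rfl

-- ===== VERDICT (by name: the statement is the Claim_ definition above) =====
theorem think_spec : Claim_equal_think := by
  intro query _
  show think query = think_alt query
  unfold think think_alt
  rw [keywordPriority_split]
  simp only [List.foldl_append, fold_group (fun w => PySem.Str.isIn w (PySem.Str.lower query))]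
  cases h1 : (["how", "explain", "describe"].any
      fun w => PySem.Str.isIn w (PySem.Str.lower query)) <;>
  cases h2 : (["what is", "define", "meaning"].any
      fun w => PySem.Str.isIn w (PySem.Str.lower query)) <;>
  cases h3 : (["why", "reason", "cause"].any
      fun w => PySem.Str.isIn w (PySem.Str.lower query)) <;>
  cases h4 : (["list", "enumerate", "give", "examples"].any
      fun w => PySem.Str.isIn w (PySem.Str.lower query)) <;>
  simp [h1, h2, h3, h4, typeNames] <;> rfl
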